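-- pv_equiv track=rewrite | github.com/felipeGsousa/topic-esp-projeto-01 | src/Result.py | knn_improve_result
-- ===== SOURCE A (Python) =====
-- def knn_improve_result(show, result, neigh_number):
--
--     str_result = "["
--
--     c = 0
--     for i in range(len(result)):
--         str_result += str(result[i]) + " "
--         c += 1
--         if c == 37:
--             str_result += "\n"
--             str_result += " "
--             c = 0
--     str_result = str_result.rstrip() + "]"
--
--     str_knn_improve = f"""\n
-- ##########################=   KNN Improve   =##############################
--
-- Vizinhanca = {neigh_number}
--
-- Porcentagem: {show}%
--
-- Resultado:
-- {str_result}"""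
--     return str_knn_improve
-- ===== SOURCE B (Python) =====
-- def knn_improve_result(show, result, neigh_number):
--     chunks = [result[i:i + 37] for i in range(0, len(result), 37)]
--     body = " \n ".join(" ".join(str(x) for x in chunk) for chunk in chunks)
--     str_result = "[" + body + "]"
--     str_knn_improve = f"""\n
-- ##########################=   KNN Improve   =##############################
--
-- Vizinhanca = {neigh_number}
--
-- Porcentagem: {show}%
--
-- Resultado:
-- {str_result}"""
--     return str_knn_improve
-- ===== Notes on version B (the rewrite author's own statement) =====
-- stated objective: idiomatic
-- what changed: Replaces the single loop with a running counter and in-loop newline/rstrip bookkeeping by slicing the list into chunks of 37 and building the body with nested str.join, wrapped once in brackets.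
import Mathlib
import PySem

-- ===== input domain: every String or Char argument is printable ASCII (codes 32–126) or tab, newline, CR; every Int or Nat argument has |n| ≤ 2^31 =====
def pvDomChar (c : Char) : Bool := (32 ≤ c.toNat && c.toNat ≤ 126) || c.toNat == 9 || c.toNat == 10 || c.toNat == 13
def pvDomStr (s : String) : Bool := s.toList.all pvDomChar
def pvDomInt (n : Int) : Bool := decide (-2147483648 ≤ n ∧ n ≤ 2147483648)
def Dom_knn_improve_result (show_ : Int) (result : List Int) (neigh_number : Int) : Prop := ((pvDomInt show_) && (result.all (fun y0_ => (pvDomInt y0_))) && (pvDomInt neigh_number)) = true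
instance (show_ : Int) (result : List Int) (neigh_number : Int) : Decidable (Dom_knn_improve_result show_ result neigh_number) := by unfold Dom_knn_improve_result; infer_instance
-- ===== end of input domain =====

-- B replaces A's single loop with a running counter (newline every 37 items) by
-- chunking the list into slices of 37 and joining them (simpler, no counter state).

-- the f-string template, identical in both Pythons
def pvTemplate (show_ neigh_number : Int) (strRes : List Char) : String :=
  String.ofList (("\n\n##########################=   KNN Improve   =##############################\n\nVizinhanca = ").toList
    ++ PySem.Int.toChars neigh_number
    ++ ("\n\nPorcentagem: ").toList
    ++ PySem.Int.toChars show_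
    ++ ("%\n\nResultado: \n").toList
    ++ strRes)

-- ===== PORT A =====
-- loop body: str_result += str(result[i]) + " "; c += 1; if c == 37: += "\n"; += " "; c = 0
def pvStep (acc : List Char × Int) (x : Int) : List Char × Int :=
  let s := acc.1 ++ PySem.Int.toChars x ++ [' ']
  let c := acc.2 + 1
  if c == 37 then (s ++ ['\n'] ++ [' '], 0) else (s, c)

def knn_improve_result (show_ : Int) (result : List Int) (neigh_number : Int) : String :=
  let st := (PySem.List.pyRange 0 (PySem.List.len result) 1).foldl
      (fun acc i => pvStep acc (PySem.List.pyGetD result i 0)) ("[".toList, (0 : Int))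
  let strRes := PySem.Chars.rstrip st.1 ++ "]".toList
  pvTemplate show_ neigh_number strRes

-- ===== PORT B =====
def knn_improve_result_alt (show_ : Int) (result : List Int) (neigh_number : Int) : String :=
  let chunks := (PySem.List.pyRange 0 (PySem.List.len result) 37).map
      (fun i => PySem.List.slice result (some i) (some (i + 37)))
  let body := PySem.Chars.join [' ', '\n', ' ']
      (chunks.map (fun ch => PySem.Chars.join [' '] (ch.map PySem.Int.toChars)))
  pvTemplate show_ neigh_number ("[".toList ++ body ++ "]".toList)

-- ===== PRECONDITION & SPEC =====
def Spec_knn_improve_result (show_ : Int) (result : List Int) (neigh_number : Int) (out : String) : Prop := out = knn_improve_result_alt show_ result neigh_number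
instance (show_ : Int) (result : List Int) (neigh_number : Int) (out : String) : Decidable (Spec_knn_improve_result show_ result neigh_number out) := by unfold Spec_knn_improve_result; infer_instance

-- ===== CLAIM (what is proved, stated in full; the proofs are below) =====
def Claim_equal_knn_improve_result : Prop := ∀ (show_ : Int) (result : List Int) (neigh_number : Int), Dom_knn_improve_result show_ result neigh_number → Spec_knn_improve_result show_ result neigh_number (knn_improve_result show_ result neigh_number)

-- ===== LEMMAS AND PROOFS =====

-- the output A's loop appends after the initial "[" when the counter stands at c
def pvG : List Int → Int → List Char
  | [], _ => []
  | x :: xs, c =>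
      PySem.Int.toChars x ++
        (if c + 1 == 37 then ' ' :: '\n' :: ' ' :: pvG xs 0 else ' ' :: pvG xs (c + 1))

-- the separator-structured body (no trailing whitespace) with k slots left in the current row
def pvB : List Int → Nat → List Char
  | [], _ => []
  | [x], _ => PySem.Int.toChars x
  | x :: y :: ys, k =>
      PySem.Int.toChars x ++
        (if k = 1 then ' ' :: '\n' :: ' ' :: pvB (y :: ys) 37 else ' ' :: pvB (y :: ys) (k - 1))

def pvRow (ch : List Int) : List Char := PySem.Chars.join [' '] (ch.map PySem.Int.toChars)

def pvChunks (xs : List Int) : List (List Int) :=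
  if h : xs = [] then [] else xs.take 37 :: pvChunks (xs.drop 37)
termination_by xs.length
decreasing_by
  have : xs.length ≠ 0 := fun hl => h (List.eq_nil_of_length_eq_zero hl)
  simp [List.length_drop]; omega

lemma pvG_cons (x : Int) (xs : List Int) (c : Int) :
    pvG (x :: xs) c = PySem.Int.toChars x ++
      (if c + 1 == 37 then ' ' :: '\n' :: ' ' :: pvG xs 0 else ' ' :: pvG xs (c + 1)) := rfl

lemma pvB_cons₂ (x y : Int) (ys : List Int) (k : Nat) :
    pvB (x :: y :: ys) k = PySem.Int.toChars x ++
      (if k = 1 then ' ' :: '\n' :: ' ' :: pvB (y :: ys) 37 else ' ' :: pvB (y :: ys) (k - 1)) := rfl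

lemma pvFoldl_fst : ∀ (xs : List Int) (acc : List Char) (c : Int),
    (List.foldl pvStep (acc, c) xs).1 = acc ++ pvG xs c := by
  intro xs
  induction xs with
  | nil => intro acc c; simp [pvG]
  | cons x xs ih =>
    intro acc c
    simp only [List.foldl_cons, pvStep, pvG, beq_iff_eq]
    by_cases h : c + 1 = 37
    · simp [h, ih, List.append_assoc]
    · simp [h, ih, List.append_assoc]

lemma pvDigitChar_nonspace (m : Nat) : PySem.Chars.isspace (Nat.digitChar m) = false := by
  rcases Nat.lt_or_ge m 16 with h | h
  · interval_cases m <;> rfl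
  · have he : Nat.digitChar m = '*' := by
      simp only [Nat.digitChar]
      rw [if_neg (by omega), if_neg (by omega), if_neg (by omega), if_neg (by omega),
        if_neg (by omega), if_neg (by omega), if_neg (by omega), if_neg (by omega),
        if_neg (by omega), if_neg (by omega), if_neg (by omega), if_neg (by omega),
        if_neg (by omega), if_neg (by omega), if_neg (by omega), if_neg (by omega)]
    rw [he]; rfl

lemma pvToDigitsCore_nonspace : ∀ (f n : Nat) (acc : List Char),
    (∀ c ∈ acc, PySem.Chars.isspace c = false) →
    ∀ c ∈ Nat.toDigitsCore 10 f n acc, PySem.Chars.isspace c = false := by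
  intro f
  induction f with
  | zero => intro n acc hacc c hc; simpa [Nat.toDigitsCore] using hacc c (by simpa [Nat.toDigitsCore] using hc)
  | succ f ih =>
    intro n acc hacc c hc
    have hacc' : ∀ c ∈ Nat.digitChar (n % 10) :: acc, PySem.Chars.isspace c = false := by
      intro c hc
      rcases List.mem_cons.mp hc with h | h
      · subst h; exact pvDigitChar_nonspace _
      · exact hacc c h
    simp only [Nat.toDigitsCore] at hc
    by_cases h : n / 10 = 0
    · rw [if_pos h] at hc; exact hacc' c hc
    · rw [if_neg h] at hc; exact ih _ _ hacc' c hc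

lemma pvToDigitsCore_ne_nil : ∀ (f n : Nat) (acc : List Char), acc ≠ [] →
    Nat.toDigitsCore 10 f n acc ≠ [] := by
  intro f
  induction f with
  | zero => intro n acc h; simpa [Nat.toDigitsCore] using h
  | succ f ih =>
    intro n acc h
    simp only [Nat.toDigitsCore]
    by_cases hd : n / 10 = 0
    · rw [if_pos hd]; simp
    · rw [if_neg hd]; exact ih _ _ (by simp)

lemma pvToDigits_ne_nil (n : Nat) : Nat.toDigits 10 n ≠ [] := by
  show Nat.toDigitsCore 10 (n + 1) n [] ≠ []
  simp only [Nat.toDigitsCore]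
  by_cases hd : n / 10 = 0
  · rw [if_pos hd]; simp
  · rw [if_neg hd]; exact pvToDigitsCore_ne_nil _ _ _ (by simp)

lemma pvToDigits_nonspace (n : Nat) : ∀ c ∈ Nat.toDigits 10 n, PySem.Chars.isspace c = false := by
  intro c hc
  exact pvToDigitsCore_nonspace (n + 1) n [] (by simp) c hc

lemma pvToChars_decomp (n : Int) :
    ∃ a d, PySem.Int.toChars n = a ++ [d] ∧ PySem.Chars.isspace d = false := by
  by_cases hn : n < 0
  · have hne := pvToDigits_ne_nil n.natAbs
    refine ⟨'-' :: (Nat.toDigits 10 n.natAbs).dropLast, (Nat.toDigits 10 n.natAbs).getLast hne, ?_, ?_⟩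
    · simp [PySem.Int.toChars, hn, List.dropLast_append_getLast hne]
    · exact pvToDigits_nonspace _ _ (List.getLast_mem hne)
  · have hne := pvToDigits_ne_nil n.toNat
    refine ⟨(Nat.toDigits 10 n.toNat).dropLast, (Nat.toDigits 10 n.toNat).getLast hne, ?_, ?_⟩
    · simp [PySem.Int.toChars, hn, List.dropLast_append_getLast hne]
    · exact pvToDigits_nonspace _ _ (List.getLast_mem hne)

lemma pvB_last : ∀ (xs : List Int) (k : Nat), xs ≠ [] →
    ∃ a d, pvB xs k = a ++ [d] ∧ PySem.Chars.isspace d = false := by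
  intro xs
  induction xs with
  | nil => simp
  | cons x xs ih =>
    intro k _
    cases xs with
    | nil =>
      obtain ⟨a, d, h1, h2⟩ := pvToChars_decomp x
      exact ⟨a, d, by simpa [pvB] using h1, h2⟩
    | cons y ys =>
      obtain ⟨a, d, h1, h2⟩ := ih 37 (by simp)
      obtain ⟨a', d', h1', h2'⟩ := ih (k - 1) (by simp)
      by_cases hk : k = 1
      · exact ⟨PySem.Int.toChars x ++ ' ' :: '\n' :: ' ' :: a, d,
          by simp [pvB, hk, h1, List.append_assoc], h2⟩
      · exact ⟨PySem.Int.toChars x ++ ' ' :: a', d',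
          by simp [pvB, hk, h1', List.append_assoc], h2'⟩

lemma pvRstrip_append_space (a t : List Char) (h : ∀ c ∈ t, PySem.Chars.isspace c = true) :
    PySem.Chars.rstrip (a ++ t) = PySem.Chars.rstrip a := by
  have ht : List.dropWhile PySem.Chars.isspace t.reverse = [] :=
    List.dropWhile_eq_nil_iff.mpr (fun c hc => h c (List.mem_reverse.mp hc))
  simp [PySem.Chars.rstrip, List.reverse_append, List.dropWhile_append, ht]

lemma pvRstrip_append_nonspace (a : List Char) (d : Char) (h : PySem.Chars.isspace d = false) :
    PySem.Chars.rstrip (a ++ [d]) = a ++ [d] := by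
  simp [PySem.Chars.rstrip, List.reverse_append, h]

-- A's loop output = structured body plus a trailing all-whitespace tail, k slots left in row
lemma pvG_eq_pvB : ∀ (xs : List Int) (k : Nat), 1 ≤ k → k ≤ 37 → xs ≠ [] →
    ∃ t, pvG xs (37 - (k : Int)) = pvB xs k ++ t ∧ ∀ c ∈ t, PySem.Chars.isspace c = true := by
  intro xs
  induction xs with
  | nil => simp
  | cons x xs ih =>
    intro k h1 h2 _
    cases xs with
    | nil =>
      by_cases hk : k = 1
      · refine ⟨[' ', '\n', ' '], ?_, by intro c hc; fin_cases hc <;> rfl⟩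
        subst hk
        rw [pvG_cons]
        simp only [beq_iff_eq]
        rw [if_pos (by norm_num)]
        simp [pvG, pvB]
      · refine ⟨[' '], ?_, by intro c hc; fin_cases hc <;> rfl⟩
        rw [pvG_cons]
        simp only [beq_iff_eq]
        rw [if_neg (by omega)]
        simp [pvG, pvB]
    | cons y ys =>
      by_cases hk : k = 1
      · obtain ⟨t, ht, hsp⟩ := ih 37 (by norm_num) (by norm_num) (by simp)
        refine ⟨t, ?_, hsp⟩
        have h0 : (37 : Int) - ((37 : Nat) : Int) = 0 := by norm_num
        rw [h0] at ht
        subst hk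
        rw [pvG_cons, pvB_cons₂]
        simp only [beq_iff_eq, if_true]
        rw [if_pos (by norm_num), ht]
        simp [List.append_assoc]
      · obtain ⟨t, ht, hsp⟩ := ih (k - 1) (by omega) (by omega) (by simp)
        refine ⟨t, ?_, hsp⟩
        have hcast : (37 : Int) - ((k - 1 : Nat) : Int) = 37 - (k : Int) + 1 := by omega
        rw [hcast] at ht
        rw [pvG_cons, pvB_cons₂]
        simp only [beq_iff_eq]
        rw [if_neg (by omega), if_neg hk, ht]
        simp [List.append_assoc]

-- a list that fits in the current row renders as a single space-joined row
lemma pvB_row : ∀ (xs : List Int) (k : Nat), xs ≠ [] → xs.length ≤ k → pvB xs k = pvRow xs := by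
  intro xs
  induction xs with
  | nil => simp
  | cons x xs ih =>
    intro k _ hlen
    cases xs with
    | nil => simp [pvB, pvRow, PySem.Chars.join_singleton]
    | cons y ys =>
      have hk : k ≠ 1 := by simp at hlen; omega
      have := ih (k - 1) (by simp) (by simp at hlen ⊢; omega)
      simp only [pvB, if_neg hk, this, pvRow, List.map_cons, PySem.Chars.join_cons_cons]
      simp

-- splitting off a full first row of k elements
lemma pvB_split : ∀ (xs : List Int) (k : Nat), 1 ≤ k → k < xs.length →
    pvB xs k = pvRow (xs.take k) ++ (' ' :: '\n' :: ' ' :: pvB (xs.drop k) 37) := by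
  intro xs
  induction xs with
  | nil => intro k _ h; simp at h
  | cons x xs ih =>
    intro k h1 h2
    cases xs with
    | nil => simp at h2; omega
    | cons y ys =>
      by_cases hk : k = 1
      · subst hk
        simp [pvB, pvRow, PySem.Chars.join_singleton]
      · obtain ⟨k', rfl⟩ : ∃ k', k = k' + 1 := ⟨k - 1, by omega⟩
        have hk1 : 1 ≤ k' := by omega
        have hk2 : k' < (y :: ys).length := by simp at h2 ⊢; omega
        have hrec := ih k' hk1 (by simp at h2 ⊢; omega)
        have htk : (y :: ys).take k' ≠ [] := by
          simp [List.take_eq_nil_iff]; omega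
        cases hsh : (y :: ys).take k' with
        | nil => exact absurd hsh htk
        | cons a l =>
          rw [pvB_cons₂, if_neg hk]
          simp only [Nat.add_sub_cancel]
          rw [hrec, List.take_succ_cons, List.drop_succ_cons, hsh]
          simp only [pvRow, List.map_cons, PySem.Chars.join_cons_cons]
          simp [List.append_assoc]

-- the pyRange/slice chunking computes pvChunks
lemma pvChunks_eq (xs : List Int) :
    (PySem.List.pyRange 0 (PySem.List.len xs) 37).map
      (fun i => PySem.List.slice xs (some i) (some (i + 37))) = pvChunks xs := by
  by_cases h : xs = []
  · subst h
    rw [pvChunks]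
    simp [PySem.List.pyRange_of_pos _ _ (by norm_num : (0:Int) < 37), PySem.List.len]
  · have hL : 0 < xs.length := List.length_pos_iff.mpr h
    have hlen : PySem.List.len xs = (xs.length : Int) := by simp [PySem.List.len]
    rw [pvChunks, dif_neg h]
    rw [PySem.List.pyRange_of_pos _ _ (by norm_num : (0:Int) < 37), hlen]
    rw [if_pos (by exact_mod_cast hL)]
    have hN : (((xs.length : Int) - 0 + 37 - 1) / 37).toNat =
        ((((xs.drop 37).length : Int) - 0 + 37 - 1) / 37).toNat + 1 := by
      have hdl : (xs.drop 37).length = xs.length - 37 := by simp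
      rw [hdl]
      have h37 : ((xs.length - 37 : Nat) : Int) = max ((xs.length : Int) - 37) 0 := by omega
      omega
    rw [hN, List.range_succ_eq_map]
    rw [List.map_cons, List.map_cons, List.map_map]
    congr 1
    case _ =>
      -- head chunk: slice xs 0 37 = xs.take 37
      have : PySem.List.slice xs (some ((0 : Nat) : Int)) (some ((37 : Nat) : Int)) = xs.take 37 := by
        rw [PySem.List.slice_natCast]; simp
      simpa using this
    case _ =>
      -- tail chunks: shift by 37 and recurse on xs.drop 37
      have ihr := pvChunks_eq (xs.drop 37)
      rw [← ihr]
      by_cases h2 : xs.drop 37 = []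
      · rw [h2]
        simp [PySem.List.pyRange_of_pos _ _ (by norm_num : (0 : Int) < 37), PySem.List.len]
      · have hL2 : 0 < (xs.drop 37).length := List.length_pos_iff.mpr h2
        have hlen2 : PySem.List.len (xs.drop 37) = ((xs.drop 37).length : Int) := by
          simp [PySem.List.len]
        rw [PySem.List.pyRange_of_pos _ _ (by norm_num : (0:Int) < 37), hlen2,
          if_pos (by exact_mod_cast hL2)]
        rw [List.map_map, List.map_map]
        apply List.map_congr_left
        intro k _
        show PySem.List.slice xs (some (0 + 37 * ((k + 1 : Nat) : Int)))
              (some (0 + 37 * ((k + 1 : Nat) : Int) + 37)) =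
            PySem.List.slice (xs.drop 37) (some (0 + 37 * (k : Int)))
              (some (0 + 37 * (k : Int) + 37))
        have e1 : (0 + 37 * ((k + 1 : Nat) : Int)) = ((37 * k + 37 : Nat) : Int) := by push_cast; ring
        have e2 : ((37 * k + 37 : Nat) : Int) + 37 = ((37 * k + 74 : Nat) : Int) := by push_cast; ring
        have e3 : (0 + 37 * (k : Int)) = ((37 * k : Nat) : Int) := by push_cast; ring
        have e4 : ((37 * k : Nat) : Int) + 37 = ((37 * k + 37 : Nat) : Int) := by push_cast; ring
        rw [e1, e2, e3, e4, PySem.List.slice_natCast, PySem.List.slice_natCast]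
        rw [List.drop_drop]
        have h1' : 37 * k + 74 - (37 * k + 37) = 37 := by omega
        have h2' : 37 * k + 37 - 37 * k = 37 := by omega
        have h3' : 37 * k + 37 = 37 + 37 * k := by omega
        rw [h1', h2', h3']
termination_by xs.length
decreasing_by
  have : xs.length ≠ 0 := fun hl => h (List.eq_nil_of_length_eq_zero hl)
  simp [List.length_drop]; omega

-- joining the chunk rows gives the structured body
lemma pvJoin_chunks (xs : List Int) (h : xs ≠ []) :
    PySem.Chars.join [' ', '\n', ' '] ((pvChunks xs).map pvRow) = pvB xs 37 := by
  rw [pvChunks, dif_neg h]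
  by_cases h2 : xs.drop 37 = []
  · have hlen : xs.length ≤ 37 := by
      have : xs.length - 37 = 0 := by simpa using congrArg List.length h2
      omega
    rw [h2]
    rw [show pvChunks ([] : List Int) = [] from by rw [pvChunks]; simp]
    simp only [List.map_cons, List.map_nil, PySem.Chars.join_singleton]
    rw [List.take_of_length_le hlen, pvB_row xs 37 h hlen]
  · have hlen : 37 < xs.length := by
      have : (xs.drop 37).length ≠ 0 := fun hl => h2 (List.eq_nil_of_length_eq_zero hl)
      simp at this; omega
    have ihr := pvJoin_chunks (xs.drop 37) h2
    obtain ⟨a, l, hal⟩ : ∃ a l, (pvChunks (xs.drop 37)).map pvRow = a :: l := by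
      rw [pvChunks, dif_neg h2]; exact ⟨_, _, rfl⟩
    rw [List.map_cons, hal, PySem.Chars.join_cons_cons, ← hal, ihr]
    rw [pvB_split xs 37 (by norm_num) hlen]
    simp [List.append_assoc]
termination_by xs.length
decreasing_by
  have : xs.length ≠ 0 := fun hl => h (List.eq_nil_of_length_eq_zero hl)
  simp [List.length_drop]; omega

-- ===== VERDICT (by name: the statement is the Claim_ definition above) =====
theorem knn_improve_result_spec : Claim_equal_knn_improve_result := by
  intro show_ result neigh_number _
  show knn_improve_result show_ result neigh_number = knn_improve_result_alt show_ result neigh_number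
  simp only [knn_improve_result, knn_improve_result_alt]
  rw [PySem.List.foldl_pyRange_zero_pyGetD result 0 pvStep ("[".toList, (0 : Int))]
  rw [pvChunks_eq result]
  congr 1
  rw [pvFoldl_fst]
  by_cases h : result = []
  · subst h
    rw [pvChunks]
    simp [pvG, PySem.Chars.join_nil, PySem.Chars.rstrip]
    rfl
  · obtain ⟨t, ht, hsp⟩ := pvG_eq_pvB result 37 (by norm_num) (by norm_num) h
    have h0 : (37 : Int) - ((37 : Nat) : Int) = 0 := by norm_num
    rw [h0] at ht
    rw [show (fun ch : List Int => PySem.Chars.join [' '] (List.map PySem.Int.toChars ch)) = pvRow from rfl]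
    rw [pvJoin_chunks result h, ht]
    obtain ⟨a, d, hal, hns⟩ := pvB_last result 37 h
    have : ("[".toList : List Char) ++ (pvB result 37 ++ t) = (('[' :: a) ++ [d]) ++ t := by
      simp [hal]
    rw [this, pvRstrip_append_space _ _ hsp, pvRstrip_append_nonspace _ _ hns]
    simp [hal]
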